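-- pv_equiv track=rewrite | github.com/jyjoshi/PropInferenceEngine | engine.py | make_predicate_dictionary
-- ===== SOURCE A (Python) =====
-- def make_predicate_dictionary(kb):
--     predicate_dict = dict()
--     for i in range(len(kb)):
--         clause = kb[i]
--         clause_length = len(clause)
--         for j in range(clause_length):
--             term = clause[j]
--             bracket_open_index = term.index("(")
--             term_name = term[:bracket_open_index]
--             if term_name in predicate_dict.keys():
--                 predicate_dict[term_name].append((clause_length, i, j))
--             else:
--                 predicate_dict[term_name] = [(clause_length, i, j)]
--
--     for key in predicate_dict.keys():
--         values = predicate_dict[key]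
--         sorted_values = sorted(values)
--         predicate_dict[key] = sorted_values
--
--     return predicate_dict
-- ===== SOURCE B (Python) =====
-- def make_predicate_dictionary(kb):
--     records = []
--     for i, clause in enumerate(kb):
--         clause_length = len(clause)
--         for j, term in enumerate(clause):
--             name = term[:term.index("(")]
--             records.append((name, (clause_length, i, j)))
--     predicate_dict = {name: [] for name, _ in records}
--     for name, rec in sorted(records, key=lambda r: r[1]):
--         predicate_dict[name].append(rec)
--     return predicate_dict
-- ===== Notes on version B (the rewrite author's own statement) =====
-- stated objective: alternative
-- what changed: Instead of grouping into a dict and then sorting each key's list separately, B builds one flat record list, sorts it once globally by the (clause_length,i,j) component, and fills a pre-seeded dict in a single stable grouping pass.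
import Mathlib
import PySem

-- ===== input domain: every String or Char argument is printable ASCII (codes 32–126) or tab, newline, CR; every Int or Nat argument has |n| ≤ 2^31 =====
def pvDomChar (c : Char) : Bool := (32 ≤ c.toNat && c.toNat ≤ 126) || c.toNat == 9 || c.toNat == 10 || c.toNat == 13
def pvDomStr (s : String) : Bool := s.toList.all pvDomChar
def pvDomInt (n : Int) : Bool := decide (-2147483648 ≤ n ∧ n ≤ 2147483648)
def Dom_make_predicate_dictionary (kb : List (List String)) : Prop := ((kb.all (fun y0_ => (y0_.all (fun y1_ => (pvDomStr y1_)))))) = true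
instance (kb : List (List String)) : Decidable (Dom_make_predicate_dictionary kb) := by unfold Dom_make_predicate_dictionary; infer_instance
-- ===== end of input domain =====

-- B replaces A's "group into a dict, then sort each key's list" by "one global stable sort of a flat
-- record list, then a single grouping pass over a pre-seeded dict" (alternative decomposition, same cost).

-- shared name extraction: term[:term.index("(")] (both Pythons compute it identically)
def pvNameOf (term : String) : String :=
  PySem.Str.slice term none (some (PySem.Str.find term "("))

-- Python's lexicographic '<' on the 3-tuple (clause_length, i, j)
def pvLex3 (t : Int × Int × Int) : Int ×ₗ (Int ×ₗ Int) := toLex (t.1, toLex (t.2.1, t.2.2))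

-- ===== PORT A =====
def make_predicate_dictionary (kb : List (List String)) : List (String × List (Int × Int × Int)) :=
  let d1 : PySem.Dict String (List (Int × Int × Int)) :=
    (PySem.List.enumerate kb 0).foldl (fun d ic =>
      let clause := ic.2
      let clause_length : Int := clause.length
      (PySem.List.enumerate clause 0).foldl (fun d jt =>
        let term_name := pvNameOf jt.2
        if d.contains term_name then
          d.insert term_name (d.getD term_name [] ++ [(clause_length, ic.1, jt.1)])
        else
          d.insert term_name [(clause_length, ic.1, jt.1)]) d) PySem.Dict.empty
  let d2 := d1.keys.foldl (fun d key => d.insert key (PySem.List.sorted (d.getD key []) pvLex3 false)) d1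
  d2.items

-- ===== PORT B =====
def make_predicate_dictionary_alt (kb : List (List String)) : List (String × List (Int × Int × Int)) :=
  let records : List (String × (Int × Int × Int)) :=
    (PySem.List.enumerate kb 0).foldl (fun acc ic =>
      (PySem.List.enumerate ic.2 0).foldl (fun acc jt =>
        acc ++ [(pvNameOf jt.2, ((ic.2.length : Int), ic.1, jt.1))]) acc) []
  let seed : PySem.Dict String (List (Int × Int × Int)) :=
    records.foldl (fun d r => d.insert r.1 []) PySem.Dict.empty
  let d := (PySem.List.sorted records (fun r => pvLex3 r.2) false).foldl
      (fun d r => d.modify r.1 [] (· ++ [r.2])) seed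
  d.items

-- ===== PRECONDITION & SPEC =====
-- A raises ValueError (term.index("(")) on any term without "("; exactly those inputs are excluded.
def Pre_make_predicate_dictionary (kb : List (List String)) : Prop :=
  ∀ clause ∈ kb, ∀ term ∈ clause, PySem.Str.isIn "(" term = true
instance (kb : List (List String)) : Decidable (Pre_make_predicate_dictionary kb) := by
  unfold Pre_make_predicate_dictionary; infer_instance
def pvWitness_make_predicate_dictionary : List (List String) := [["P(x)", "Q(y)"], ["P(z)"]]

def Spec_make_predicate_dictionary (kb : List (List String)) (out : List (String × List (Int × Int × Int))) : Prop := out = make_predicate_dictionary_alt kb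
instance (kb : List (List String)) (out : List (String × List (Int × Int × Int))) : Decidable (Spec_make_predicate_dictionary kb out) := by unfold Spec_make_predicate_dictionary; infer_instance

-- ===== CLAIM (what is proved, stated in full; the proofs are below) =====
def Claim_equal_make_predicate_dictionary : Prop := ∀ (kb : List (List String)), Dom_make_predicate_dictionary kb → Pre_make_predicate_dictionary kb → Spec_make_predicate_dictionary kb (make_predicate_dictionary kb)

-- ===== LEMMAS AND PROOFS =====

-- the flat record list both programs traverse, in build order
def pvRecs (kb : List (List String)) : List (String × (Int × Int × Int)) :=
  (PySem.List.enumerate kb 0).flatMap (fun ic =>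
    (PySem.List.enumerate ic.2 0).map (fun jt => (pvNameOf jt.2, ((ic.2.length : Int), ic.1, jt.1))))

theorem pvLex3_injective : Function.Injective pvLex3 := by
  rintro ⟨a1, a2, a3⟩ ⟨b1, b2, b3⟩ h
  simp only [pvLex3] at h
  have h' := congrArg ofLex h
  simp only [ofLex_toLex, Prod.mk.injEq] at h'
  obtain ⟨h1, h2⟩ := h'
  have h'' := congrArg ofLex h2
  simp only [ofLex_toLex, Prod.mk.injEq] at h''
  simp [h1, h''.1, h''.2]

-- sorting each key's group separately = filtering the globally sorted record list
theorem pv_filter_sorted (recs : List (String × (Int × Int × Int))) (k : String) :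
    PySem.List.sorted ((recs.filter (fun r => r.1 == k)).map (fun x => x.2)) pvLex3 false
      = ((PySem.List.sorted recs (fun r => pvLex3 r.2) false).filter (fun r => r.1 == k)).map (fun x => x.2) := by
  apply PySem.List.eq_of_perm_of_pairwise_le_of_injective pvLex3 pvLex3_injective
  · exact (PySem.List.sorted_perm _ pvLex3 false).trans
      (((PySem.List.sorted_perm recs (fun r => pvLex3 r.2) false).filter _).map _).symm
  · exact PySem.List.sorted_pairwise _ pvLex3
  · rw [List.pairwise_map]
    exact (PySem.List.sorted_pairwise recs (fun r => pvLex3 r.2)).filter _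

-- A's build loop, rewritten record by record
theorem pvA_build_eq (kb : List (List String)) :
    ((PySem.List.enumerate kb 0).foldl (fun d ic =>
      (PySem.List.enumerate ic.2 0).foldl (fun d jt =>
        let term_name := pvNameOf jt.2
        if d.contains term_name then
          d.insert term_name (d.getD term_name [] ++ [((ic.2.length : Int), ic.1, jt.1)])
        else
          d.insert term_name [((ic.2.length : Int), ic.1, jt.1)]) d)
      (PySem.Dict.empty : PySem.Dict String (List (Int × Int × Int))))
    = (pvRecs kb).foldl (fun d p => d.modify p.1 [] (· ++ [p.2])) PySem.Dict.empty := by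
  rw [pvRecs, List.foldl_flatMap]
  apply PySem.List.foldl_congr_mem
  intro d ic _
  rw [List.foldl_map]
  apply PySem.List.foldl_congr_mem
  intro d jt _
  by_cases h : d.contains (pvNameOf jt.2) = true
  · simp only [h, if_true]; rfl
  · have : d.getD (pvNameOf jt.2) [] = [] := PySem.Dict.getD_of_not_contains _ _ (by simpa using h)
    simp only [h]
    show _ = d.insert (pvNameOf jt.2) (d.getD (pvNameOf jt.2) [] ++ _)
    rw [this]; rfl

-- B's record-building loop builds exactly pvRecs
theorem pvB_records_eq (kb : List (List String)) :
    ((PySem.List.enumerate kb 0).foldl (fun acc ic =>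
      (PySem.List.enumerate ic.2 0).foldl (fun acc jt =>
        acc ++ [(pvNameOf jt.2, ((ic.2.length : Int), ic.1, jt.1))]) acc) [])
    = pvRecs kb := by
  have hcongr : ((PySem.List.enumerate kb 0).foldl (fun acc ic =>
      (PySem.List.enumerate ic.2 0).foldl (fun acc jt =>
        acc ++ [(pvNameOf jt.2, ((ic.2.length : Int), ic.1, jt.1))]) acc) [])
      = (PySem.List.enumerate kb 0).foldl (fun acc ic =>
          acc ++ (PySem.List.enumerate ic.2 0).map
            (fun jt => (pvNameOf jt.2, ((ic.2.length : Int), ic.1, jt.1)))) [] := by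
    apply PySem.List.foldl_congr_mem
    intro acc ic _
    exact PySem.List.foldl_append_singleton_eq_map _ _ _
  rw [hcongr, PySem.List.foldl_append_eq_flatMap, List.nil_append, pvRecs]

-- a Set.update by elements it already has is the identity
theorem pv_update_self {s : PySem.Set String} {xs : List String} (h : ∀ x ∈ xs, x ∈ s) :
    PySem.Set.update s xs = s := by
  rw [PySem.Set.update_eq_append_filter]
  have : (PySem.Set.ofList xs).filter (fun y => !PySem.Set.contains s y) = [] := by
    rw [List.filter_eq_nil_iff]
    intro y hy
    have hys : y ∈ s := h y ((PySem.Set.mem_ofList _ _).mp hy)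
    simpa using hys
  rw [this, List.append_nil]

-- the seeding loop leaves every value [] (each insert writes [])
theorem pv_seed_getD (rs : List (String × (Int × Int × Int)))
    (d : PySem.Dict String (List (Int × Int × Int))) (hd : ∀ k, d.getD k [] = []) (k : String) :
    (rs.foldl (fun d r => d.insert r.1 []) d).getD k [] = [] := by
  induction rs generalizing d with
  | nil => exact hd k
  | cons r rs ih =>
    simp only [List.foldl_cons]
    refine ih _ (fun k' => ?_)
    rw [PySem.Dict.getD_insert]
    split <;> simp [hd]

-- A's sorting pass: each existing key's value is replaced by its sorted version
theorem pv_sortpass_getD (ks : List String) (hnd : ks.Nodup)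
    (d : PySem.Dict String (List (Int × Int × Int))) (k : String) :
    (ks.foldl (fun d key => d.insert key (PySem.List.sorted (d.getD key []) pvLex3 false)) d).getD k []
      = if k ∈ ks then PySem.List.sorted (d.getD k []) pvLex3 false else d.getD k [] := by
  induction ks generalizing d with
  | nil => simp
  | cons k0 ks ih =>
    simp only [List.foldl_cons]
    have hnd' : ks.Nodup := hnd.of_cons
    rw [ih hnd']
    by_cases hk : k = k0
    · subst hk
      have : k ∉ ks := (List.nodup_cons.mp hnd).1
      simp [this, PySem.Dict.getD_insert_self]
    · rw [PySem.Dict.getD_insert_of_ne _ _ _ hk]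
      simp [hk]

-- the grouping fold (A after rewriting, B's second pass): keys and values
theorem pv_group_keys (rs : List (String × (Int × Int × Int)))
    (d : PySem.Dict String (List (Int × Int × Int))) :
    (rs.foldl (fun d p => d.modify p.1 [] (· ++ [p.2])) d).keys
      = PySem.Set.update d.keys (rs.map Prod.fst) :=
  PySem.Dict.keys_foldl_modify_key rs Prod.fst [] (fun _ p v => v ++ [p.2]) d

theorem make_predicate_dictionary_eq_canonical (kb : List (List String)) :
    make_predicate_dictionary kb
      = (PySem.Set.ofList ((pvRecs kb).map Prod.fst)).map (fun k =>
          (k, PySem.List.sorted (((pvRecs kb).filter (fun r => r.1 == k)).map (fun x => x.2)) pvLex3 false)) := by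
  unfold make_predicate_dictionary
  rw [pvA_build_eq kb]
  set d1 := (pvRecs kb).foldl (fun d p => d.modify p.1 [] (· ++ [p.2])) PySem.Dict.empty with hd1
  have hkeys1 : d1.keys = PySem.Set.ofList ((pvRecs kb).map Prod.fst) := by
    rw [hd1, pv_group_keys]
    simp [PySem.Dict.keys_empty, PySem.Set.update_nil_left]
  have hnd1 : d1.keys.Nodup := by rw [hkeys1]; exact PySem.Set.nodup_ofList _
  have hgetD1 : ∀ k, d1.getD k [] = ((pvRecs kb).filter (fun r => r.1 == k)).map (fun x => x.2) := by
    intro k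
    rw [hd1, PySem.Dict.getD_foldl_modify_append]
    simp [PySem.Dict.getD_empty]
  set d2 := d1.keys.foldl (fun d key => d.insert key (PySem.List.sorted (d.getD key []) pvLex3 false)) d1 with hd2
  have hkeys2 : d2.keys = d1.keys := by
    rw [hd2, PySem.Dict.keys_foldl_insert d1.keys _ d1]
    exact pv_update_self (fun x hx => hx)
  have hnd2 : d2.keys.Nodup := hkeys2 ▸ hnd1
  rw [PySem.Dict.items_eq_map_keys d2 hnd2 [], hkeys2, hkeys1]
  apply List.map_congr_left
  intro k hk
  rw [hd2, pv_sortpass_getD d1.keys hnd1 d1 k, if_pos (hkeys1 ▸ hk), hgetD1]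

theorem make_predicate_dictionary_alt_eq_canonical (kb : List (List String)) :
    make_predicate_dictionary_alt kb
      = (PySem.Set.ofList ((pvRecs kb).map Prod.fst)).map (fun k =>
          (k, ((PySem.List.sorted (pvRecs kb) (fun r => pvLex3 r.2) false).filter (fun r => r.1 == k)).map (fun x => x.2))) := by
  unfold make_predicate_dictionary_alt
  rw [pvB_records_eq kb]
  set seed := (pvRecs kb).foldl (fun d r => d.insert r.1 []) (PySem.Dict.empty : PySem.Dict String (List (Int × Int × Int))) with hseed
  have hkeysS : seed.keys = PySem.Set.ofList ((pvRecs kb).map Prod.fst) := by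
    rw [hseed, PySem.Dict.keys_foldl_insert_key (pvRecs kb) Prod.fst (fun _ _ => []) PySem.Dict.empty]
    simp [PySem.Dict.keys_empty, PySem.Set.update_nil_left]
  have hgetDS : ∀ k, seed.getD k [] = [] := by
    intro k; exact pv_seed_getD _ _ (fun k' => by simp [PySem.Dict.getD_empty]) k
  set srt := PySem.List.sorted (pvRecs kb) (fun r => pvLex3 r.2) false with hsrt
  set d := srt.foldl (fun d r => d.modify r.1 [] (· ++ [r.2])) seed with hd
  have hkeys : d.keys = seed.keys := by
    rw [hd, pv_group_keys]
    refine pv_update_self (fun x hx => ?_)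
    rw [hkeysS]
    obtain ⟨r, hr, hrx⟩ := List.mem_map.mp hx
    have : r ∈ pvRecs kb := (PySem.List.mem_sorted _ _ _ _).mp (hsrt ▸ hr)
    exact (PySem.Set.mem_ofList _ _).mpr (List.mem_map.mpr ⟨r, this, hrx⟩)
  have hnd : d.keys.Nodup := by rw [hkeys, hkeysS]; exact PySem.Set.nodup_ofList _
  rw [PySem.Dict.items_eq_map_keys d hnd [], hkeys, hkeysS]
  apply List.map_congr_left
  intro k hk
  rw [hd, PySem.Dict.getD_foldl_modify_append, hgetDS]
  simp

-- ===== VERDICT (by name: the statement is the Claim_ definition above) =====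
theorem make_predicate_dictionary_spec : Claim_equal_make_predicate_dictionary := by
  intro kb _ _
  unfold Spec_make_predicate_dictionary
  rw [make_predicate_dictionary_eq_canonical, make_predicate_dictionary_alt_eq_canonical]
  apply List.map_congr_left
  intro k _
  rw [pv_filter_sorted]
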